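-- pv_equiv track=rewrite | github.com/MargauxB703/Dealroom_internship_assignment | part1_clustering.py | get_max_overlap
-- ===== SOURCE A (Python) =====
-- def get_max_overlap(row, new_keywords_entities):
--     all_overlaps = []
--     for i in range(len(new_keywords_entities)):
--         count = 0
--         for word in row:
--             if word in new_keywords_entities[i]:
--                 count += 1
--         all_overlaps.append(count)
--     indexs_max = [i for i, j in enumerate(all_overlaps) if j == max(all_overlaps)]
--     return(indexs_max[0])
-- ===== SOURCE B (Python) =====
-- def get_max_overlap(row, new_keywords_entities):
--     best_i = 0
--     best_c = sum(word in new_keywords_entities[0] for word in row)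
--     for i in range(1, len(new_keywords_entities)):
--         c = sum(word in new_keywords_entities[i] for word in row)
--         if c > best_c:
--             best_i, best_c = i, c
--     return best_i
-- ===== Notes on version B (the rewrite author's own statement) =====
-- stated objective: simpler
-- what changed: Single running argmax (keep best index/count, update on strictly greater) instead of building the full overlap list, computing its max, filtering all argmax indices and taking the first.
import Mathlib
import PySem

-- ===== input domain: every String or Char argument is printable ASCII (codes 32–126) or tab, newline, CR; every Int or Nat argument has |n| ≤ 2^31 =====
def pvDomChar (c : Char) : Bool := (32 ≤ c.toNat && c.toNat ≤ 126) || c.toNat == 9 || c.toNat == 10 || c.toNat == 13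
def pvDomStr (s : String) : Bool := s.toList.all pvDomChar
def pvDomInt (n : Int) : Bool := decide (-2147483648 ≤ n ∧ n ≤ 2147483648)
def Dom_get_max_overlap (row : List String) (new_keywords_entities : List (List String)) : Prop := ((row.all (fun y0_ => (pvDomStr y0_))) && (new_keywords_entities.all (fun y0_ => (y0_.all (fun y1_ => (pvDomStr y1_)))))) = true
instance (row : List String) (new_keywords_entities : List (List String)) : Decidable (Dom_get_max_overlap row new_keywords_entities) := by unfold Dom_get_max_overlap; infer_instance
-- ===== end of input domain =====

-- B replaces A's build-overlap-list / max() / filter-all-argmax-indices / take-first pipeline by a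
-- single running argmax (objective: simpler, O(1) extra space; same asymptotic time).

-- ===== PORT A =====
def get_max_overlap (row : List String) (new_keywords_entities : List (List String)) : Int :=
  let all_overlaps := new_keywords_entities.map
    (fun ent => row.foldl (fun count word => if word ∈ ent then count + 1 else count) (0 : Int))
  let m := (PySem.List.max? all_overlaps (fun y => y)).getD 0
  let indexs_max := (PySem.List.enumerate all_overlaps 0).filterMap
    (fun p => if p.2 = m then some p.1 else none)
  indexs_max.headD 0

-- ===== PORT B =====
def pvCount (row ent : List String) : Int :=
  (row.map (fun word => if word ∈ ent then (1 : Int) else 0)).sum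

def get_max_overlap_alt (row : List String) (new_keywords_entities : List (List String)) : Int :=
  match new_keywords_entities with
  | [] => 0   -- Python B raises IndexError here; outside Pre_
  | e0 :: rest =>
    ((PySem.List.enumerate rest 1).foldl
      (fun st p =>
        let c := pvCount row p.2
        if c > st.2 then (p.1, c) else st)
      ((0 : Int), pvCount row e0)).1

-- ===== PRECONDITION & SPEC =====
-- Pre_ excludes the empty entity list, on which Python A raises ValueError (max of empty sequence).
def Pre_get_max_overlap (row : List String) (new_keywords_entities : List (List String)) : Prop :=
  new_keywords_entities ≠ []
instance (row : List String) (new_keywords_entities : List (List String)) : Decidable (Pre_get_max_overlap row new_keywords_entities) := by unfold Pre_get_max_overlap; infer_instance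

def pvWitness_get_max_overlap : List String × List (List String) := (["a", "b"], [["c"], ["a", "b"]])

def Spec_get_max_overlap (row : List String) (new_keywords_entities : List (List String)) (out : Int) : Prop := out = get_max_overlap_alt row new_keywords_entities
instance (row : List String) (new_keywords_entities : List (List String)) (out : Int) : Decidable (Spec_get_max_overlap row new_keywords_entities out) := by unfold Spec_get_max_overlap; infer_instance

-- ===== CLAIM (what is proved, stated in full; the proofs are below) =====
def Claim_equal_get_max_overlap : Prop := ∀ (row : List String) (new_keywords_entities : List (List String)), Dom_get_max_overlap row new_keywords_entities → Pre_get_max_overlap row new_keywords_entities → Spec_get_max_overlap row new_keywords_entities (get_max_overlap row new_keywords_entities)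

-- ===== LEMMAS AND PROOFS =====

-- first-argmax/max of the nonempty list x0 :: r
def pvFam : Int → List Int → Int × Int
  | x0, [] => (0, x0)
  | x0, x :: r => let p := pvFam x r; if p.2 > x0 then (p.1 + 1, p.2) else (0, x0)

theorem pv_foldl_max_comm : ∀ (r : List Int) (a b : Int), r.foldl max (max a b) = max a (r.foldl max b) := by
  intro r
  induction r with
  | nil => intro a b; simp
  | cons x t ih =>
    intro a b
    simp only [List.foldl_cons]
    rw [max_assoc, ih]

theorem pvFam_snd : ∀ (r : List Int) (x0 : Int), (pvFam x0 r).2 = r.foldl max x0 := by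
  intro r
  induction r with
  | nil => intro x0; simp [pvFam]
  | cons x t ih =>
    intro x0
    simp only [pvFam, List.foldl_cons]
    rw [pv_foldl_max_comm, ← ih]
    rcases lt_or_ge x0 (pvFam x t).2 with h | h
    · simp [h, max_eq_right (le_of_lt h)]
    · have hn : ¬ (pvFam x t).2 > x0 := not_lt.mpr h
      simp [hn, max_eq_left h]

theorem pv_enumerate_map {α β : Type} (f : α → β) : ∀ (r : List α) (k : Int),
    PySem.List.enumerate (r.map f) k = (PySem.List.enumerate r k).map (fun p => (p.1, f p.2)) := by
  intro r
  induction r with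
  | nil => intro k; simp [PySem.List.enumerate_nil]
  | cons x t ih => intro k; simp [PySem.List.enumerate_cons, ih]

theorem pvCount_eq (ent : List String) : ∀ (row : List String) (acc : Int),
    row.foldl (fun count word => if word ∈ ent then count + 1 else count) acc = acc + pvCount row ent := by
  intro row
  induction row with
  | nil => intro acc; simp [pvCount]
  | cons w t ih =>
    intro acc
    simp only [List.foldl_cons, pvCount, List.map_cons, List.sum_cons]
    by_cases h : w ∈ ent
    · simp [h, ih, pvCount]; ring
    · simp [h, ih, pvCount]

theorem pv_foldB : ∀ (r : List Int) (k b c : Int),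
    (PySem.List.enumerate r k).foldl (fun st p => if p.2 > st.2 then (p.1, p.2) else st) ((b, c) : Int × Int)
      = match r with
        | [] => (b, c)
        | x :: r' => if (pvFam x r').2 > c then (k + (pvFam x r').1, (pvFam x r').2) else (b, c) := by
  intro r
  induction r with
  | nil => intro k b c; simp [PySem.List.enumerate_nil]
  | cons x r' ih =>
    intro k b c
    simp only [PySem.List.enumerate_cons, List.foldl_cons]
    cases r' with
    | nil =>
      simp only [PySem.List.enumerate_nil, List.foldl_nil, pvFam]
      by_cases h : x > c <;> simp [h]
    | cons y r'' =>
      by_cases hx : x > c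
      · rw [if_pos hx, ih (k + 1) k x]
        simp only [pvFam]
        by_cases hm : (pvFam y r'').2 > x
        · have hmc : (pvFam y r'').2 > c := lt_trans hx hm
          simp [hm, hmc, Prod.ext_iff]
          omega
        · simp [hm, hx]
      · rw [if_neg hx, ih (k + 1) b c]
        simp only [pvFam]
        by_cases hm : (pvFam y r'').2 > x
        · simp only [hm, if_pos hm]
          by_cases hmc : (pvFam y r'').2 > c
          · simp [hmc, Prod.ext_iff]; omega
          · simp [hmc]
        · simp only [if_neg hm]
          have hxc : ¬ ((pvFam y r'').2 > c) := by omega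
          simp [hxc, hx]

theorem pv_headIdx : ∀ (r : List Int) (x0 k : Int),
    ((PySem.List.enumerate (x0 :: r) k).filterMap
        (fun p => if p.2 = (pvFam x0 r).2 then some p.1 else none)).headD 0
      = k + (pvFam x0 r).1 := by
  intro r
  induction r with
  | nil => intro x0 k; simp [PySem.List.enumerate_cons, PySem.List.enumerate_nil, pvFam]
  | cons x r' ih =>
    intro x0 k
    by_cases hm : (pvFam x r').2 > x0
    · have hfam : pvFam x0 (x :: r') = ((pvFam x r').1 + 1, (pvFam x r').2) := by
        simp [pvFam, hm]
      have hne : ¬ (x0 = (pvFam x0 (x :: r')).2) := by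
        rw [hfam]; intro h; exact absurd hm (by omega)
      rw [hfam] at hne ⊢
      rw [PySem.List.enumerate_cons]
      simp only [List.filterMap_cons]
      rw [if_neg hne]
      have := ih x (k + 1)
      simp only at this ⊢
      rw [this]
      omega
    · have hfam : pvFam x0 (x :: r') = (0, x0) := by simp [pvFam, hm]
      rw [hfam, PySem.List.enumerate_cons]
      simp [List.filterMap_cons]

theorem get_max_overlap_eq (row : List String) (e0 : List String) (rest : List (List String)) :
    get_max_overlap row (e0 :: rest) = get_max_overlap_alt row (e0 :: rest) := by
  have hmapA : (e0 :: rest).map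
      (fun ent => row.foldl (fun count word => if word ∈ ent then count + 1 else count) (0 : Int))
      = pvCount row e0 :: rest.map (fun ent => pvCount row ent) := by
    simp only [List.map_cons]
    congr 1
    · rw [pvCount_eq]; ring
    · apply List.map_congr_left; intro ent _; rw [pvCount_eq]; ring
  -- A side: zeta-reduce the lets by `show`, then rewrite to pvFam
  have hA : get_max_overlap row (e0 :: rest)
      = (pvFam (pvCount row e0) (rest.map (fun ent => pvCount row ent))).1 := by
    show ((PySem.List.enumerate ((e0 :: rest).map
        (fun ent => row.foldl (fun count word => if word ∈ ent then count + 1 else count) (0 : Int)) ) 0).filterMap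
        (fun p => if p.2 = ((PySem.List.max? ((e0 :: rest).map
          (fun ent => row.foldl (fun count word => if word ∈ ent then count + 1 else count) (0 : Int))) (fun y => y)).getD 0)
          then some p.1 else none)).headD 0 = _
    rw [hmapA, PySem.List.max?_id_cons]
    simp only [Option.getD_some]
    rw [← pvFam_snd]
    have h2 := pv_headIdx (rest.map (fun ent => pvCount row ent)) (pvCount row e0) 0
    convert h2 using 3
    omega
  have hB : get_max_overlap_alt row (e0 :: rest)
      = (((PySem.List.enumerate (rest.map (fun ent => pvCount row ent)) 1).foldl
          (fun st p => if p.2 > st.2 then (p.1, p.2) else st)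
          ((0 : Int), pvCount row e0))).1 := by
    show (((PySem.List.enumerate rest 1).foldl
        (fun st p => let c := pvCount row p.2; if c > st.2 then (p.1, c) else st)
        ((0 : Int), pvCount row e0))).1 = _
    rw [pv_enumerate_map, List.foldl_map]
  rw [hA, hB, pv_foldB]
  cases h : rest.map (fun ent => pvCount row ent) with
  | nil => simp [pvFam]
  | cons x r' =>
    simp only [pvFam]
    by_cases hm : (pvFam x r').2 > pvCount row e0
    · simp [hm]; omega
    · simp [hm]

theorem get_max_overlap_spec : Claim_equal_get_max_overlap := by
  intro row ents _hdom hpre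
  unfold Spec_get_max_overlap
  cases ents with
  | nil => exact absurd rfl hpre
  | cons e0 rest => exact get_max_overlap_eq row e0 rest
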